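-- pv_equiv track=rewrite | github.com/ElevateConsultingDev/netrek_containerized | netrek_client_pygame/netrek/distress.py | _parse_conditional_block
-- ===== SOURCE A (Python) =====
-- def _parse_conditional_block(text, pos):
--     """Parse %{true%!false%} block. Returns (true_str, false_str, new_pos)."""
--     # Expect %{
--     if pos + 1 < len(text) and text[pos] == '%' and text[pos + 1] == '{':
--         pos += 2
--     else:
--         return '', '', pos
--
--     # Read true branch until %! or %}
--     true_parts = []
--     depth = 0
--     while pos < len(text):
--         if text[pos] == '%' and pos + 1 < len(text):
--             if text[pos + 1] == '{':
--                 depth += 1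
--                 true_parts.append('%{')
--                 pos += 2
--             elif text[pos + 1] == '}' and depth > 0:
--                 depth -= 1
--                 true_parts.append('%}')
--                 pos += 2
--             elif text[pos + 1] == '!' and depth == 0:
--                 pos += 2
--                 break
--             elif text[pos + 1] == '}' and depth == 0:
--                 pos += 2
--                 return ''.join(true_parts), '', pos
--             else:
--                 true_parts.append(text[pos])
--                 pos += 1
--         else:
--             true_parts.append(text[pos])
--             pos += 1
--
--     true_str = ''.join(true_parts)
--
--     # Read false branch until %}
--     false_parts = []
--     depth = 0
--     while pos < len(text):
--         if text[pos] == '%' and pos + 1 < len(text):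
--             if text[pos + 1] == '{':
--                 depth += 1
--                 false_parts.append('%{')
--                 pos += 2
--             elif text[pos + 1] == '}' and depth > 0:
--                 depth -= 1
--                 false_parts.append('%}')
--                 pos += 2
--             elif text[pos + 1] == '}' and depth == 0:
--                 pos += 2
--                 break
--             else:
--                 false_parts.append(text[pos])
--                 pos += 1
--         else:
--             false_parts.append(text[pos])
--             pos += 1
--
--     return true_str, ''.join(false_parts), pos
-- ===== SOURCE B (Python) =====
-- def _tokenize(text, pos):
--     """Lex text[pos:] once, depth-free, into flat lexemes: a '%{', '%}' or '%!'
--     pair, else a single character."""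
--     toks = []
--     while pos < len(text):
--         if text[pos] == '%' and pos + 1 < len(text) and text[pos + 1] in '{}!':
--             toks.append(text[pos] + text[pos + 1])
--             pos += 2
--         else:
--             toks.append(text[pos])
--             pos += 1
--     return toks
--
--
-- def _parse_conditional_block(text, pos):
--     """Parse %{true%!false%} block. Returns (true_str, false_str, new_pos)."""
--     if pos + 1 < len(text) and text[pos] == '%' and text[pos + 1] == '{':
--         pos += 2
--     else:
--         return '', '', pos
--     true_parts, false_parts, seen_bang, depth = [], [], False, 0
--     for tok in _tokenize(text, pos):
--         pos += len(tok)
--         if tok == '%{':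
--             depth += 1
--         elif tok == '%}' and depth > 0:
--             depth -= 1
--         elif tok == '%}':
--             break
--         elif tok == '%!' and depth == 0 and not seen_bang:
--             seen_bang = True
--             continue
--         (false_parts if seen_bang else true_parts).append(tok)
--     return ''.join(true_parts), ''.join(false_parts), pos
-- ===== Notes on version B (the rewrite author's own statement) =====
-- stated objective: alternative
-- what changed: A fuses lexing and branch splitting in two near-duplicate depth-tracking while-loops with early returns; B first tokenizes the whole tail once into flat depth-free lexemes ('%{'/'%}'/'%!' pairs or single chars) and then splits the branches in a single for-loop over the token stream, so the character-pairing rules exist in exactly one place.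
import Mathlib
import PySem

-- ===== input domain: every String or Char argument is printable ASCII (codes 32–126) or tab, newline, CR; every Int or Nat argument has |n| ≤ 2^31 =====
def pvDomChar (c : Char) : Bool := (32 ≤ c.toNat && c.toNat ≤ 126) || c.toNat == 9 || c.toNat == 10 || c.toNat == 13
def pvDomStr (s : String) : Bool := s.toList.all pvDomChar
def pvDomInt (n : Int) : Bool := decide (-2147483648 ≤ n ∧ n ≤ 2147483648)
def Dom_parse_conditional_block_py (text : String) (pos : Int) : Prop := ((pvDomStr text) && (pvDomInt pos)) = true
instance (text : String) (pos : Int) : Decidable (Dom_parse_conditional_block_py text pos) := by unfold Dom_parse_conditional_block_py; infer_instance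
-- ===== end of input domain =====

-- B replaces A's two fused lex-and-split while-loops by a separate depth-free
-- tokenization pass followed by a single branch-splitting loop over the tokens;
-- same return value everywhere A returns (Pre_ excludes only the inputs where
-- both programs raise IndexError).

-- ===== PORT A =====
-- A's first while loop ("read true branch until %! or %}").  Third component:
-- true  = fall through to the second loop (break on a depth-0 '%!', or end of text),
-- false = the early `return ''.join(true_parts), '', pos` on a depth-0 '%}'.
-- `.getD '?'` stands where Python raises IndexError; Pre_ excludes exactly those inputs.

def pvALoop1 (t : List Char) (pos depth : Int) (acc : List (List Char)) :
    List Char × Int × Bool :=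
  if _h : pos < (t.length : Int) then
    if (PySem.List.pyGet? t pos).getD '?' = '%' ∧ pos + 1 < (t.length : Int) then
      if (PySem.List.pyGet? t (pos + 1)).getD '?' = '{' then
        pvALoop1 t (pos + 2) (depth + 1) (acc ++ [['%', '{']])
      else if (PySem.List.pyGet? t (pos + 1)).getD '?' = '}' ∧ 0 < depth then
        pvALoop1 t (pos + 2) (depth - 1) (acc ++ [['%', '}']])
      else if (PySem.List.pyGet? t (pos + 1)).getD '?' = '!' ∧ depth = 0 then
        (PySem.Chars.join [] acc, pos + 2, true)
      else if (PySem.List.pyGet? t (pos + 1)).getD '?' = '}' ∧ depth = 0 then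
        (PySem.Chars.join [] acc, pos + 2, false)
      else pvALoop1 t (pos + 1) depth (acc ++ [[(PySem.List.pyGet? t pos).getD '?']])
    else pvALoop1 t (pos + 1) depth (acc ++ [[(PySem.List.pyGet? t pos).getD '?']])
  else (PySem.Chars.join [] acc, pos, true)
termination_by ((t.length : Int) - pos).toNat
decreasing_by all_goals omega

-- A's second while loop ("read false branch until %}").

def pvALoop2 (t : List Char) (pos depth : Int) (acc : List (List Char)) :
    List Char × Int :=
  if _h : pos < (t.length : Int) then
    if (PySem.List.pyGet? t pos).getD '?' = '%' ∧ pos + 1 < (t.length : Int) then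
      if (PySem.List.pyGet? t (pos + 1)).getD '?' = '{' then
        pvALoop2 t (pos + 2) (depth + 1) (acc ++ [['%', '{']])
      else if (PySem.List.pyGet? t (pos + 1)).getD '?' = '}' ∧ 0 < depth then
        pvALoop2 t (pos + 2) (depth - 1) (acc ++ [['%', '}']])
      else if (PySem.List.pyGet? t (pos + 1)).getD '?' = '}' ∧ depth = 0 then
        (PySem.Chars.join [] acc, pos + 2)
      else pvALoop2 t (pos + 1) depth (acc ++ [[(PySem.List.pyGet? t pos).getD '?']])
    else pvALoop2 t (pos + 1) depth (acc ++ [[(PySem.List.pyGet? t pos).getD '?']])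
  else (PySem.Chars.join [] acc, pos)
termination_by ((t.length : Int) - pos).toNat
decreasing_by all_goals omega

-- Tuple returns are read by projection (Python's unpacking).

def parse_conditional_block_py (text : String) (pos : Int) : String × String × Int :=
  let t := text.toList
  if pos + 1 < (t.length : Int) ∧ PySem.List.pyGet? t pos = some '%'
      ∧ PySem.List.pyGet? t (pos + 1) = some '{' then
    let r := pvALoop1 t (pos + 2) 0 []
    if r.2.2 then
      let q := pvALoop2 t r.2.1 0 []
      (String.ofList r.1, String.ofList q.1, q.2)
    else (String.ofList r.1, "", r.2.1)
  else ("", "", pos)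

-- ===== PORT B =====
-- B's depth-free lexer _tokenize(text, pos): '%{' / '%}' / '%!' pairs or single chars.

def pvTokenize (t : List Char) (pos : Int) : List (List Char) :=
  if _h : pos < (t.length : Int) then
    if (PySem.List.pyGet? t pos).getD '?' = '%' ∧ pos + 1 < (t.length : Int) ∧
        ((PySem.List.pyGet? t (pos + 1)).getD '?' = '{' ∨
         (PySem.List.pyGet? t (pos + 1)).getD '?' = '}' ∨
         (PySem.List.pyGet? t (pos + 1)).getD '?' = '!') then
      ['%', (PySem.List.pyGet? t (pos + 1)).getD '?'] :: pvTokenize t (pos + 2)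
    else [(PySem.List.pyGet? t pos).getD '?'] :: pvTokenize t (pos + 1)
  else []
termination_by ((t.length : Int) - pos).toNat
decreasing_by all_goals omega

-- B's single for-loop over the token stream (break = return of the triple;
-- `(false_parts if seen_bang else true_parts).append(tok)` is the seenBang-guarded append).

def pvSplit (toks : List (List Char)) (pos : Int) (tp fp : List (List Char))
    (seenBang : Bool) (depth : Int) : String × String × Int :=
  match toks with
  | [] => (String.ofList (PySem.Chars.join [] tp), String.ofList (PySem.Chars.join [] fp), pos)
  | tok :: rest =>
    let pos' := pos + (tok.length : Int)
    if tok = ['%', '{'] then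
      if seenBang then pvSplit rest pos' tp (fp ++ [tok]) seenBang (depth + 1)
      else pvSplit rest pos' (tp ++ [tok]) fp seenBang (depth + 1)
    else if tok = ['%', '}'] ∧ 0 < depth then
      if seenBang then pvSplit rest pos' tp (fp ++ [tok]) seenBang (depth - 1)
      else pvSplit rest pos' (tp ++ [tok]) fp seenBang (depth - 1)
    else if tok = ['%', '}'] then
      (String.ofList (PySem.Chars.join [] tp), String.ofList (PySem.Chars.join [] fp), pos')
    else if tok = ['%', '!'] ∧ depth = 0 ∧ seenBang = false then
      pvSplit rest pos' tp fp true depth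
    else
      if seenBang then pvSplit rest pos' tp (fp ++ [tok]) seenBang depth
      else pvSplit rest pos' (tp ++ [tok]) fp seenBang depth

def parse_conditional_block_py_alt (text : String) (pos : Int) : String × String × Int :=
  let t := text.toList
  if pos + 1 < (t.length : Int) ∧ PySem.List.pyGet? t pos = some '%'
      ∧ PySem.List.pyGet? t (pos + 1) = some '{' then
    pvSplit (pvTokenize t (pos + 2)) (pos + 2) [] [] false 0
  else ("", "", pos)

-- ===== PRECONDITION & SPEC =====
-- Pre_ excludes exactly the inputs where A raises IndexError (the read text[pos] with
-- pos < -len(text), reached when the short-circuit guard pos+1 < len(text) holds); B raises there too.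
def Pre_parse_conditional_block_py (text : String) (pos : Int) : Prop :=
  ¬ (pos + 1 < (text.toList.length : Int) ∧ pos < -(text.toList.length : Int))
instance (text : String) (pos : Int) : Decidable (Pre_parse_conditional_block_py text pos) := by
  unfold Pre_parse_conditional_block_py; infer_instance

def pvWitness_parse_conditional_block_py : String × Int := ("%{a%!b%}", 0)

def Spec_parse_conditional_block_py (text : String) (pos : Int) (out : String × String × Int) : Prop :=
  out = parse_conditional_block_py_alt text pos
instance (text : String) (pos : Int) (out : String × String × Int) :
    Decidable (Spec_parse_conditional_block_py text pos out) := by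
  unfold Spec_parse_conditional_block_py; infer_instance

-- ===== CLAIM (what is proved, stated in full; the proofs are below) =====
def Claim_equal_parse_conditional_block_py : Prop :=
  ∀ (text : String) (pos : Int), Dom_parse_conditional_block_py text pos →
    Pre_parse_conditional_block_py text pos →
      Spec_parse_conditional_block_py text pos (parse_conditional_block_py text pos)

-- ===== LEMMAS AND PROOFS =====

-- ''.join with empty separator is list flattening.

theorem jf (l : List (List Char)) : PySem.Chars.join [] l = l.flatten := by
  induction l with
  | nil => rfl
  | cons a as ih => cases as with
    | nil => simp [PySem.Chars.join_singleton]
    | cons b bs => rw [PySem.Chars.join_cons_cons] at *; simp_all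

-- A's second loop depends on its accumulator only as a joined prefix.

theorem pvALoop2_acc (t : List Char) : ∀ (n : Nat) (pos depth : Int) (acc a : List (List Char)),
    ((t.length : Int) - pos).toNat ≤ n →
    pvALoop2 t pos depth (a ++ acc) =
      (PySem.Chars.join [] a ++ (pvALoop2 t pos depth acc).1, (pvALoop2 t pos depth acc).2) := by
  intro n
  induction n with
  | zero =>
    intro pos depth acc a hn
    have h0 : ¬ pos < (t.length : Int) := by omega
    have hL : pvALoop2 t pos depth (a ++ acc) = (PySem.Chars.join [] (a ++ acc), pos) := by
      rw [pvALoop2, dif_neg h0]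
    have hR : pvALoop2 t pos depth acc = (PySem.Chars.join [] acc, pos) := by
      rw [pvALoop2, dif_neg h0]
    rw [hL, hR]; simp [jf]
  | succ n ih =>
    intro pos depth acc a hn
    by_cases h0 : pos < (t.length : Int)
    case neg =>
      have hL : pvALoop2 t pos depth (a ++ acc) = (PySem.Chars.join [] (a ++ acc), pos) := by
        rw [pvALoop2, dif_neg h0]
      have hR : pvALoop2 t pos depth acc = (PySem.Chars.join [] acc, pos) := by
        rw [pvALoop2, dif_neg h0]
      rw [hL, hR]; simp [jf]
    case pos =>
      by_cases c1 : (PySem.List.pyGet? t pos).getD '?' = '%' ∧ pos + 1 < (t.length : Int)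
      · by_cases c2 : (PySem.List.pyGet? t (pos + 1)).getD '?' = '{'
        · have hL : pvALoop2 t pos depth (a ++ acc) =
              pvALoop2 t (pos + 2) (depth + 1) ((a ++ acc) ++ [['%', '{']]) := by
            rw [pvALoop2, dif_pos h0, if_pos c1, if_pos c2]
          have hR : pvALoop2 t pos depth acc =
              pvALoop2 t (pos + 2) (depth + 1) (acc ++ [['%', '{']]) := by
            rw [pvALoop2, dif_pos h0, if_pos c1, if_pos c2]
          rw [hL, hR, List.append_assoc]
          exact ih (pos + 2) (depth + 1) (acc ++ [['%', '{']]) a (by omega)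
        · by_cases c3 : (PySem.List.pyGet? t (pos + 1)).getD '?' = '}' ∧ 0 < depth
          · have hL : pvALoop2 t pos depth (a ++ acc) =
                pvALoop2 t (pos + 2) (depth - 1) ((a ++ acc) ++ [['%', '}']]) := by
              rw [pvALoop2, dif_pos h0, if_pos c1, if_neg c2, if_pos c3]
            have hR : pvALoop2 t pos depth acc =
                pvALoop2 t (pos + 2) (depth - 1) (acc ++ [['%', '}']]) := by
              rw [pvALoop2, dif_pos h0, if_pos c1, if_neg c2, if_pos c3]
            rw [hL, hR, List.append_assoc]
            exact ih (pos + 2) (depth - 1) (acc ++ [['%', '}']]) a (by omega)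
          · by_cases c4 : (PySem.List.pyGet? t (pos + 1)).getD '?' = '}' ∧ depth = 0
            · have hL : pvALoop2 t pos depth (a ++ acc) =
                  (PySem.Chars.join [] (a ++ acc), pos + 2) := by
                rw [pvALoop2, dif_pos h0, if_pos c1, if_neg c2, if_neg c3, if_pos c4]
              have hR : pvALoop2 t pos depth acc = (PySem.Chars.join [] acc, pos + 2) := by
                rw [pvALoop2, dif_pos h0, if_pos c1, if_neg c2, if_neg c3, if_pos c4]
              rw [hL, hR]; simp [jf]
            · have hL : pvALoop2 t pos depth (a ++ acc) =
                  pvALoop2 t (pos + 1) depth ((a ++ acc) ++ [[(PySem.List.pyGet? t pos).getD '?']]) := by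
                rw [pvALoop2, dif_pos h0, if_pos c1, if_neg c2, if_neg c3, if_neg c4]
              have hR : pvALoop2 t pos depth acc =
                  pvALoop2 t (pos + 1) depth (acc ++ [[(PySem.List.pyGet? t pos).getD '?']]) := by
                rw [pvALoop2, dif_pos h0, if_pos c1, if_neg c2, if_neg c3, if_neg c4]
              rw [hL, hR, List.append_assoc]
              exact ih (pos + 1) depth (acc ++ [[(PySem.List.pyGet? t pos).getD '?']]) a (by omega)
      · have hL : pvALoop2 t pos depth (a ++ acc) =
            pvALoop2 t (pos + 1) depth ((a ++ acc) ++ [[(PySem.List.pyGet? t pos).getD '?']]) := by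
          rw [pvALoop2, dif_pos h0, if_neg c1]
        have hR : pvALoop2 t pos depth acc =
            pvALoop2 t (pos + 1) depth (acc ++ [[(PySem.List.pyGet? t pos).getD '?']]) := by
          rw [pvALoop2, dif_pos h0, if_neg c1]
        rw [hL, hR, List.append_assoc]
        exact ih (pos + 1) depth (acc ++ [[(PySem.List.pyGet? t pos).getD '?']]) a (by omega)

-- Consequence: the accumulator matters only through its flattening.

theorem pvALoop2_flat (t : List Char) (pos depth : Int) (acc : List (List Char)) :
    pvALoop2 t pos depth acc =
      (acc.flatten ++ (pvALoop2 t pos depth []).1, (pvALoop2 t pos depth []).2) := by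
  have h := pvALoop2_acc t ((t.length : Int) - pos).toNat pos depth [] acc le_rfl
  simpa [jf] using h

-- Same accumulator lemma for A's first loop.

theorem pvALoop1_acc (t : List Char) : ∀ (n : Nat) (pos depth : Int) (acc a : List (List Char)),
    ((t.length : Int) - pos).toNat ≤ n →
    pvALoop1 t pos depth (a ++ acc) =
      (PySem.Chars.join [] a ++ (pvALoop1 t pos depth acc).1,
       (pvALoop1 t pos depth acc).2.1, (pvALoop1 t pos depth acc).2.2) := by
  intro n
  induction n with
  | zero =>
    intro pos depth acc a hn
    have h0 : ¬ pos < (t.length : Int) := by omega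
    have hL : pvALoop1 t pos depth (a ++ acc) = (PySem.Chars.join [] (a ++ acc), pos, true) := by
      rw [pvALoop1, dif_neg h0]
    have hR : pvALoop1 t pos depth acc = (PySem.Chars.join [] acc, pos, true) := by
      rw [pvALoop1, dif_neg h0]
    rw [hL, hR]; simp [jf]
  | succ n ih =>
    intro pos depth acc a hn
    by_cases h0 : pos < (t.length : Int)
    case neg =>
      have hL : pvALoop1 t pos depth (a ++ acc) = (PySem.Chars.join [] (a ++ acc), pos, true) := by
        rw [pvALoop1, dif_neg h0]
      have hR : pvALoop1 t pos depth acc = (PySem.Chars.join [] acc, pos, true) := by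
        rw [pvALoop1, dif_neg h0]
      rw [hL, hR]; simp [jf]
    case pos =>
      by_cases c1 : (PySem.List.pyGet? t pos).getD '?' = '%' ∧ pos + 1 < (t.length : Int)
      · by_cases c2 : (PySem.List.pyGet? t (pos + 1)).getD '?' = '{'
        · have hL : pvALoop1 t pos depth (a ++ acc) =
              pvALoop1 t (pos + 2) (depth + 1) ((a ++ acc) ++ [['%', '{']]) := by
            rw [pvALoop1, dif_pos h0, if_pos c1, if_pos c2]
          have hR : pvALoop1 t pos depth acc =
              pvALoop1 t (pos + 2) (depth + 1) (acc ++ [['%', '{']]) := by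
            rw [pvALoop1, dif_pos h0, if_pos c1, if_pos c2]
          rw [hL, hR, List.append_assoc]
          exact ih (pos + 2) (depth + 1) (acc ++ [['%', '{']]) a (by omega)
        · by_cases c3 : (PySem.List.pyGet? t (pos + 1)).getD '?' = '}' ∧ 0 < depth
          · have hL : pvALoop1 t pos depth (a ++ acc) =
                pvALoop1 t (pos + 2) (depth - 1) ((a ++ acc) ++ [['%', '}']]) := by
              rw [pvALoop1, dif_pos h0, if_pos c1, if_neg c2, if_pos c3]
            have hR : pvALoop1 t pos depth acc =
                pvALoop1 t (pos + 2) (depth - 1) (acc ++ [['%', '}']]) := by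
              rw [pvALoop1, dif_pos h0, if_pos c1, if_neg c2, if_pos c3]
            rw [hL, hR, List.append_assoc]
            exact ih (pos + 2) (depth - 1) (acc ++ [['%', '}']]) a (by omega)
          · by_cases c4 : (PySem.List.pyGet? t (pos + 1)).getD '?' = '!' ∧ depth = 0
            · have hL : pvALoop1 t pos depth (a ++ acc) =
                  (PySem.Chars.join [] (a ++ acc), pos + 2, true) := by
                rw [pvALoop1, dif_pos h0, if_pos c1, if_neg c2, if_neg c3, if_pos c4]
              have hR : pvALoop1 t pos depth acc = (PySem.Chars.join [] acc, pos + 2, true) := by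
                rw [pvALoop1, dif_pos h0, if_pos c1, if_neg c2, if_neg c3, if_pos c4]
              rw [hL, hR]; simp [jf]
            · by_cases c5 : (PySem.List.pyGet? t (pos + 1)).getD '?' = '}' ∧ depth = 0
              · have hL : pvALoop1 t pos depth (a ++ acc) =
                    (PySem.Chars.join [] (a ++ acc), pos + 2, false) := by
                  rw [pvALoop1, dif_pos h0, if_pos c1, if_neg c2, if_neg c3, if_neg c4, if_pos c5]
                have hR : pvALoop1 t pos depth acc = (PySem.Chars.join [] acc, pos + 2, false) := by
                  rw [pvALoop1, dif_pos h0, if_pos c1, if_neg c2, if_neg c3, if_neg c4, if_pos c5]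
                rw [hL, hR]; simp [jf]
              · have hL : pvALoop1 t pos depth (a ++ acc) =
                    pvALoop1 t (pos + 1) depth ((a ++ acc) ++ [[(PySem.List.pyGet? t pos).getD '?']]) := by
                  rw [pvALoop1, dif_pos h0, if_pos c1, if_neg c2, if_neg c3, if_neg c4, if_neg c5]
                have hR : pvALoop1 t pos depth acc =
                    pvALoop1 t (pos + 1) depth (acc ++ [[(PySem.List.pyGet? t pos).getD '?']]) := by
                  rw [pvALoop1, dif_pos h0, if_pos c1, if_neg c2, if_neg c3, if_neg c4, if_neg c5]
                rw [hL, hR, List.append_assoc]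
                exact ih (pos + 1) depth (acc ++ [[(PySem.List.pyGet? t pos).getD '?']]) a (by omega)
      · have hL : pvALoop1 t pos depth (a ++ acc) =
            pvALoop1 t (pos + 1) depth ((a ++ acc) ++ [[(PySem.List.pyGet? t pos).getD '?']]) := by
          rw [pvALoop1, dif_pos h0, if_neg c1]
        have hR : pvALoop1 t pos depth acc =
            pvALoop1 t (pos + 1) depth (acc ++ [[(PySem.List.pyGet? t pos).getD '?']]) := by
          rw [pvALoop1, dif_pos h0, if_neg c1]
        rw [hL, hR, List.append_assoc]
        exact ih (pos + 1) depth (acc ++ [[(PySem.List.pyGet? t pos).getD '?']]) a (by omega)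

theorem pvALoop1_flat (t : List Char) (pos depth : Int) (acc : List (List Char)) :
    pvALoop1 t pos depth acc =
      (acc.flatten ++ (pvALoop1 t pos depth []).1,
       (pvALoop1 t pos depth []).2.1, (pvALoop1 t pos depth []).2.2) := by
  have h := pvALoop1_acc t ((t.length : Int) - pos).toNat pos depth [] acc le_rfl
  simpa [jf] using h

-- How A combines its two loops, as a function of the first loop's state.

def pvRHS1 (t : List Char) (pos depth : Int) (tp : List (List Char)) : String × String × Int :=
  let r := pvALoop1 t pos depth tp
  if r.2.2 then
    let q := pvALoop2 t r.2.1 0 []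
    (String.ofList r.1, String.ofList q.1, q.2)
  else (String.ofList r.1, "", r.2.1)

-- The false phase: splitting the token stream with seenBang = true computes
-- what A's second while loop computes (the true string is already fixed).

theorem pvFalsePhase (t : List Char) :
    ∀ (n : Nat) (pos depth : Int) (tp fp : List (List Char)),
      ((t.length : Int) - pos).toNat ≤ n → 0 ≤ depth →
      pvSplit (pvTokenize t pos) pos tp fp true depth =
        (String.ofList (PySem.Chars.join [] tp),
         String.ofList (pvALoop2 t pos depth fp).1,
         (pvALoop2 t pos depth fp).2) := by
  intro n
  induction n with
  | zero =>
    intro pos depth tp fp hn hd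
    have h0 : ¬ pos < (t.length : Int) := by omega
    have hT : pvTokenize t pos = [] := by rw [pvTokenize, dif_neg h0]
    have hR : pvALoop2 t pos depth fp = (PySem.Chars.join [] fp, pos) := by
      rw [pvALoop2, dif_neg h0]
    rw [hT, hR]; simp [pvSplit]
  | succ n ih =>
    intro pos depth tp fp hn hd
    by_cases h0 : pos < (t.length : Int)
    case neg =>
      have hT : pvTokenize t pos = [] := by rw [pvTokenize, dif_neg h0]
      have hR : pvALoop2 t pos depth fp = (PySem.Chars.join [] fp, pos) := by
        rw [pvALoop2, dif_neg h0]
      rw [hT, hR]; simp [pvSplit]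
    case pos =>
      by_cases cP : (PySem.List.pyGet? t pos).getD '?' = '%' ∧ pos + 1 < (t.length : Int) ∧
          ((PySem.List.pyGet? t (pos + 1)).getD '?' = '{' ∨
           (PySem.List.pyGet? t (pos + 1)).getD '?' = '}' ∨
           (PySem.List.pyGet? t (pos + 1)).getD '?' = '!')
      · have hT : pvTokenize t pos =
            ['%', (PySem.List.pyGet? t (pos + 1)).getD '?'] :: pvTokenize t (pos + 2) := by
          rw [pvTokenize, dif_pos h0, if_pos cP]
        have c1 : (PySem.List.pyGet? t pos).getD '?' = '%' ∧ pos + 1 < (t.length : Int) :=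
          ⟨cP.1, cP.2.1⟩
        rcases cP.2.2 with hc | hc | hc
        · -- token '%{'
          have hR : pvALoop2 t pos depth fp =
              pvALoop2 t (pos + 2) (depth + 1) (fp ++ [['%', '{']]) := by
            rw [pvALoop2, dif_pos h0, if_pos c1, if_pos hc]
          rw [hT, hc, hR]
          have hI := ih (pos + 2) (depth + 1) tp (fp ++ [['%', '{']]) (by omega) (by omega)
          simp [pvSplit, hI]
        · -- token '%}'
          by_cases hdp : 0 < depth
          · have hR : pvALoop2 t pos depth fp =
                pvALoop2 t (pos + 2) (depth - 1) (fp ++ [['%', '}']]) := by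
              rw [pvALoop2, dif_pos h0, if_pos c1]
              rw [if_neg (by simp [hc]), if_pos ⟨hc, hdp⟩]
            rw [hT, hc, hR]
            have hI := ih (pos + 2) (depth - 1) tp (fp ++ [['%', '}']]) (by omega) (by omega)
            simp [pvSplit, hdp, hI]
          · have hz : depth = 0 := by omega
            have hR : pvALoop2 t pos depth fp = (PySem.Chars.join [] fp, pos + 2) := by
              rw [pvALoop2, dif_pos h0, if_pos c1]
              rw [if_neg (by simp [hc]), if_neg (by simp [hdp]), if_pos ⟨hc, hz⟩]
            rw [hT, hc, hR]
            simp [pvSplit, hdp]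
        · -- token '%!' while already in the false branch: plain text in both
          have hR2 : pvALoop2 t pos depth fp =
              pvALoop2 t (pos + 2) depth (fp ++ [['%'], ['!']]) := by
            have s1 : pvALoop2 t pos depth fp =
                pvALoop2 t (pos + 1) depth (fp ++ [['%']]) := by
              rw [pvALoop2, dif_pos h0, if_pos c1]
              rw [if_neg (by simp [hc]), if_neg (by simp [hc]), if_neg (by simp [hc])]
              rw [cP.1]
            have hnx : ¬ ((PySem.List.pyGet? t (pos + 1)).getD '?' = '%' ∧
                pos + 1 + 1 < (t.length : Int)) := by simp [hc]
            have s2 : pvALoop2 t (pos + 1) depth (fp ++ [['%']]) =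
                pvALoop2 t (pos + 1 + 1) depth ((fp ++ [['%']]) ++ [['!']]) := by
              rw [pvALoop2, dif_pos (by omega), if_neg hnx, hc]
            rw [s1, s2]
            have : pos + 1 + 1 = pos + 2 := by omega
            rw [this, List.append_assoc]
            rfl
          rw [hT, hc, hR2]
          have hI := ih (pos + 2) depth tp (fp ++ [['%', '!']]) (by omega) hd
          have hcg : pvALoop2 t (pos + 2) depth (fp ++ [['%', '!']]) =
              pvALoop2 t (pos + 2) depth (fp ++ [['%'], ['!']]) := by
            rw [pvALoop2_flat t (pos + 2) depth (fp ++ [['%', '!']]),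
                pvALoop2_flat t (pos + 2) depth (fp ++ [['%'], ['!']])]
            simp
          rw [hcg] at hI
          simp [pvSplit, hI]
      · -- single-character token
        have hT : pvTokenize t pos =
            [(PySem.List.pyGet? t pos).getD '?'] :: pvTokenize t (pos + 1) := by
          rw [pvTokenize, dif_pos h0, if_neg cP]
        have hR : pvALoop2 t pos depth fp =
            pvALoop2 t (pos + 1) depth (fp ++ [[(PySem.List.pyGet? t pos).getD '?']]) := by
          by_cases c1 : (PySem.List.pyGet? t pos).getD '?' = '%' ∧ pos + 1 < (t.length : Int)
          · have hn1 : (PySem.List.pyGet? t (pos + 1)).getD '?' ≠ '{' :=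
              fun h => cP ⟨c1.1, c1.2, Or.inl h⟩
            have hn2 : (PySem.List.pyGet? t (pos + 1)).getD '?' ≠ '}' :=
              fun h => cP ⟨c1.1, c1.2, Or.inr (Or.inl h)⟩
            rw [pvALoop2, dif_pos h0, if_pos c1, if_neg hn1]
            rw [if_neg (by simp [hn2]), if_neg (by simp [hn2])]
          · rw [pvALoop2, dif_pos h0, if_neg c1]
        rw [hT, hR]
        have hI := ih (pos + 1) depth tp (fp ++ [[(PySem.List.pyGet? t pos).getD '?']]) (by omega) hd
        simp [pvSplit, hI]

-- The true phase: splitting with seenBang = false computes what A's first loop,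
-- followed on fall-through by A's second loop, computes.

theorem pvTruePhase (t : List Char) :
    ∀ (n : Nat) (pos depth : Int) (tp : List (List Char)),
      ((t.length : Int) - pos).toNat ≤ n → 0 ≤ depth →
      pvSplit (pvTokenize t pos) pos tp [] false depth = pvRHS1 t pos depth tp := by
  intro n
  induction n with
  | zero =>
    intro pos depth tp hn hd
    have h0 : ¬ pos < (t.length : Int) := by omega
    have hT : pvTokenize t pos = [] := by rw [pvTokenize, dif_neg h0]
    have hA : pvALoop1 t pos depth tp = (PySem.Chars.join [] tp, pos, true) := by
      rw [pvALoop1, dif_neg h0]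
    have hQ : pvALoop2 t pos 0 [] = (PySem.Chars.join [] [], pos) := by
      rw [pvALoop2, dif_neg h0]
    rw [hT]
    simp [pvSplit, pvRHS1, hA, hQ]
  | succ n ih =>
    intro pos depth tp hn hd
    by_cases h0 : pos < (t.length : Int)
    case neg =>
      have hT : pvTokenize t pos = [] := by rw [pvTokenize, dif_neg h0]
      have hA : pvALoop1 t pos depth tp = (PySem.Chars.join [] tp, pos, true) := by
        rw [pvALoop1, dif_neg h0]
      have hQ : pvALoop2 t pos 0 [] = (PySem.Chars.join [] [], pos) := by
        rw [pvALoop2, dif_neg h0]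
      rw [hT]
      simp [pvSplit, pvRHS1, hA, hQ]
    case pos =>
      by_cases cP : (PySem.List.pyGet? t pos).getD '?' = '%' ∧ pos + 1 < (t.length : Int) ∧
          ((PySem.List.pyGet? t (pos + 1)).getD '?' = '{' ∨
           (PySem.List.pyGet? t (pos + 1)).getD '?' = '}' ∨
           (PySem.List.pyGet? t (pos + 1)).getD '?' = '!')
      · have hT : pvTokenize t pos =
            ['%', (PySem.List.pyGet? t (pos + 1)).getD '?'] :: pvTokenize t (pos + 2) := by
          rw [pvTokenize, dif_pos h0, if_pos cP]
        have c1 : (PySem.List.pyGet? t pos).getD '?' = '%' ∧ pos + 1 < (t.length : Int) :=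
          ⟨cP.1, cP.2.1⟩
        rcases cP.2.2 with hc | hc | hc
        · -- token '%{'
          have hA : pvALoop1 t pos depth tp =
              pvALoop1 t (pos + 2) (depth + 1) (tp ++ [['%', '{']]) := by
            rw [pvALoop1, dif_pos h0, if_pos c1, if_pos hc]
          have hI := ih (pos + 2) (depth + 1) (tp ++ [['%', '{']]) (by omega) (by omega)
          rw [hT, hc]
          simp only [pvRHS1, hA]
          simp only [pvRHS1] at hI
          simp [pvSplit, hI]
        · -- token '%}'
          by_cases hdp : 0 < depth
          · have hA : pvALoop1 t pos depth tp =
                pvALoop1 t (pos + 2) (depth - 1) (tp ++ [['%', '}']]) := by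
              rw [pvALoop1, dif_pos h0, if_pos c1]
              rw [if_neg (by simp [hc]), if_pos ⟨hc, hdp⟩]
            have hI := ih (pos + 2) (depth - 1) (tp ++ [['%', '}']]) (by omega) (by omega)
            rw [hT, hc]
            simp only [pvRHS1, hA]
            simp only [pvRHS1] at hI
            simp [pvSplit, hdp, hI]
          · -- depth-0 '%}': A's early return with empty false branch
            have hz : depth = 0 := by omega
            have hA : pvALoop1 t pos depth tp = (PySem.Chars.join [] tp, pos + 2, false) := by
              rw [pvALoop1, dif_pos h0, if_pos c1]
              rw [if_neg (by simp [hc]), if_neg (by simp [hdp]),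
                  if_neg (by simp [hc]), if_pos ⟨hc, hz⟩]
            rw [hT, hc]
            simp [pvSplit, pvRHS1, hA, hdp]
        · -- token '%!'
          by_cases hz : depth = 0
          · -- the branch switch
            have hA : pvALoop1 t pos depth tp = (PySem.Chars.join [] tp, pos + 2, true) := by
              rw [pvALoop1, dif_pos h0, if_pos c1]
              rw [if_neg (by simp [hc]), if_neg (by simp [hc]), if_pos ⟨hc, hz⟩]
            have hF := pvFalsePhase t (((t.length : Int) - (pos + 2)).toNat)
              (pos + 2) 0 tp [] le_rfl le_rfl
            subst hz
            rw [hT, hc]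
            simp [pvSplit, pvRHS1, hA, hF]
          · -- '%!' at depth > 0 is plain text in both
            have hA2 : pvALoop1 t pos depth tp =
                pvALoop1 t (pos + 2) depth (tp ++ [['%'], ['!']]) := by
              have s1 : pvALoop1 t pos depth tp =
                  pvALoop1 t (pos + 1) depth (tp ++ [['%']]) := by
                rw [pvALoop1, dif_pos h0, if_pos c1]
                rw [if_neg (by simp [hc]), if_neg (by simp [hc]),
                    if_neg (by simp [hz]), if_neg (by simp [hc])]
                rw [cP.1]
              have hnx : ¬ ((PySem.List.pyGet? t (pos + 1)).getD '?' = '%' ∧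
                  pos + 1 + 1 < (t.length : Int)) := by simp [hc]
              have s2 : pvALoop1 t (pos + 1) depth (tp ++ [['%']]) =
                  pvALoop1 t (pos + 1 + 1) depth ((tp ++ [['%']]) ++ [['!']]) := by
                rw [pvALoop1, dif_pos (by omega), if_neg hnx, hc]
              rw [s1, s2]
              have : pos + 1 + 1 = pos + 2 := by omega
              rw [this, List.append_assoc]
              rfl
            have hI := ih (pos + 2) depth (tp ++ [['%', '!']]) (by omega) hd
            have hcg : pvALoop1 t (pos + 2) depth (tp ++ [['%', '!']]) =
                pvALoop1 t (pos + 2) depth (tp ++ [['%'], ['!']]) := by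
              rw [pvALoop1_flat t (pos + 2) depth (tp ++ [['%', '!']]),
                  pvALoop1_flat t (pos + 2) depth (tp ++ [['%'], ['!']])]
              simp
            rw [hT, hc]
            simp only [pvRHS1, hA2]
            simp only [pvRHS1, hcg] at hI
            simp [pvSplit, hz, hI]
      · -- single-character token
        have hT : pvTokenize t pos =
            [(PySem.List.pyGet? t pos).getD '?'] :: pvTokenize t (pos + 1) := by
          rw [pvTokenize, dif_pos h0, if_neg cP]
        have hA : pvALoop1 t pos depth tp =
            pvALoop1 t (pos + 1) depth (tp ++ [[(PySem.List.pyGet? t pos).getD '?']]) := by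
          by_cases c1 : (PySem.List.pyGet? t pos).getD '?' = '%' ∧ pos + 1 < (t.length : Int)
          · have hn1 : (PySem.List.pyGet? t (pos + 1)).getD '?' ≠ '{' :=
              fun h => cP ⟨c1.1, c1.2, Or.inl h⟩
            have hn2 : (PySem.List.pyGet? t (pos + 1)).getD '?' ≠ '}' :=
              fun h => cP ⟨c1.1, c1.2, Or.inr (Or.inl h)⟩
            have hn3 : (PySem.List.pyGet? t (pos + 1)).getD '?' ≠ '!' :=
              fun h => cP ⟨c1.1, c1.2, Or.inr (Or.inr h)⟩
            rw [pvALoop1, dif_pos h0, if_pos c1, if_neg hn1]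
            rw [if_neg (by simp [hn2]), if_neg (by simp [hn3]), if_neg (by simp [hn2])]
          · rw [pvALoop1, dif_pos h0, if_neg c1]
        have hI := ih (pos + 1) depth (tp ++ [[(PySem.List.pyGet? t pos).getD '?']]) (by omega) hd
        rw [hT]
        simp only [pvRHS1, hA]
        simp only [pvRHS1] at hI
        simp [pvSplit, hI]

theorem main_eq (text : String) (pos : Int) :
    parse_conditional_block_py text pos = parse_conditional_block_py_alt text pos := by
  unfold parse_conditional_block_py parse_conditional_block_py_alt
  by_cases hc : pos + 1 < (text.toList.length : Int) ∧
      PySem.List.pyGet? text.toList pos = some '%' ∧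
      PySem.List.pyGet? text.toList (pos + 1) = some '{'
  · simp only [if_pos hc]
    have hB := pvTruePhase text.toList (((text.toList.length : Int) - (pos + 2)).toNat)
      (pos + 2) 0 [] le_rfl le_rfl
    rw [hB]
    simp [pvRHS1]
  · simp only [if_neg hc]

-- ===== VERDICT (by name: the statement is the Claim_ definition above) =====
theorem parse_conditional_block_py_spec : Claim_equal_parse_conditional_block_py := by
  intro text pos _ _
  exact main_eq text pos
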